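-- pv_equiv track=rewrite | github.com/najicham/nba-stats-scraper | shared/utils/alert_types.py | detect_alert_type
-- ===== SOURCE A (Python) =====
-- from typing import Dict, Any, Optional
--
-- def detect_alert_type(error_msg: str, error_data: Optional[Dict] = None) -> str:
--     """
--     Auto-detect appropriate alert type from error message and context.
--
--     Args:
--         error_msg: Error message text
--         error_data: Optional error context/details dictionary
--
--     Returns:
--         Alert type key (e.g., 'processing_failed')
--
--     Detection Logic:
--         1. Check error_data for explicit alert_type
--         2. Pattern match on error message for specific cases
--         3. Fall back to processing_failed for unknown errors
--     """
--     error_data = error_data or {}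
--     error_msg_lower = error_msg.lower()
--
--     # Explicit alert type in error_data
--     if 'alert_type' in error_data:
--         return error_data['alert_type']
--
--     # Zero rows saved
--     if 'zero rows saved' in error_msg_lower or 'saved 0' in error_msg_lower:
--         return 'no_data_saved'
--
--     # No data saved
--     if 'no data saved' in error_msg_lower or 'empty result' in error_msg_lower:
--         return 'no_data_saved'
--
--     # Database conflicts (BigQuery serialization)
--     if 'could not serialize' in error_msg_lower or 'concurrent update' in error_msg_lower:
--         return 'database_conflict'
--
--     # Service failures / crashes
--     if any(keyword in error_msg_lower for keyword in ['crashed', 'terminated', 'service down', 'unavailable']):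
--         return 'service_failure'
--
--     # Performance issues
--     if any(keyword in error_msg_lower for keyword in ['slow', 'timeout', 'performance', 'taking longer']):
--         return 'slow_processing'
--
--     # Data staleness
--     if any(keyword in error_msg_lower for keyword in ['stale', 'outdated', 'not been updated', 'not updated']):
--         return 'stale_data'
--
--     # Pipeline stalls
--     if 'stall' in error_msg_lower or 'not progressing' in error_msg_lower:
--         return 'pipeline_stalled'
--
--     # Data quality issues
--     if any(keyword in error_msg_lower for keyword in ['data quality', 'incomplete', 'missing data', 'unexpected']):
--         return 'data_quality_issue'
--
--     # Validation warnings
--     if 'validation' in error_msg_lower or 'anomaly' in error_msg_lower: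
--         return 'data_anomaly'
--
--     # High unresolved count
--     if 'unresolved' in error_msg_lower and 'high' in error_msg_lower:
--         return 'high_unresolved_count'
--
--     # Default: processing failed
--     return 'processing_failed'
-- ===== SOURCE B (Python) =====
-- # Multi-pattern scan: one pass over message positions collects every matched
-- # keyword into a set; a second stage maps matched keywords to categories and a
-- # priority pass picks the winner.
-- _RULES = [
--     ('zero rows saved', 'no_data_saved'), ('saved 0', 'no_data_saved'),
--     ('no data saved', 'no_data_saved'), ('empty result', 'no_data_saved'),
--     ('could not serialize', 'database_conflict'), ('concurrent update', 'database_conflict'),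
--     ('crashed', 'service_failure'), ('terminated', 'service_failure'),
--     ('service down', 'service_failure'), ('unavailable', 'service_failure'),
--     ('slow', 'slow_processing'), ('timeout', 'slow_processing'),
--     ('performance', 'slow_processing'), ('taking longer', 'slow_processing'),
--     ('stale', 'stale_data'), ('outdated', 'stale_data'),
--     ('not been updated', 'stale_data'), ('not updated', 'stale_data'),
--     ('stall', 'pipeline_stalled'), ('not progressing', 'pipeline_stalled'),
--     ('data quality', 'data_quality_issue'), ('incomplete', 'data_quality_issue'),
--     ('missing data', 'data_quality_issue'), ('unexpected', 'data_quality_issue'),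
--     ('validation', 'data_anomaly'), ('anomaly', 'data_anomaly'),
--     ('unresolved', None), ('high', None),
-- ]
-- _PRIORITY = ['no_data_saved', 'database_conflict', 'service_failure', 'slow_processing',
--              'stale_data', 'pipeline_stalled', 'data_quality_issue', 'data_anomaly',
--              'high_unresolved_count']
--
-- def detect_alert_type(error_msg, error_data=None):
--     if error_data and 'alert_type' in error_data:
--         return error_data['alert_type']
--     m = error_msg.lower()
--     hits = set()
--     for i in range(len(m)):
--         for kw, _cat in _RULES:
--             if m.startswith(kw, i):
--                 hits.add(kw)
--     cats = {cat for kw, cat in _RULES if kw in hits and cat is not None}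
--     if 'unresolved' in hits and 'high' in hits:
--         cats.add('high_unresolved_count')
--     for cat in _PRIORITY:
--         if cat in cats:
--             return cat
--     return 'processing_failed'
-- ===== Notes on version B (the rewrite author's own statement) =====
-- stated objective: alternative
-- what changed: Replaces A's ordered short-circuit if-chain of substring tests by a naive multi-pattern matcher: a single scan over message positions collects every matched keyword into a set, then a keyword->category stage plus a priority pass picks the winner.
import Mathlib
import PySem

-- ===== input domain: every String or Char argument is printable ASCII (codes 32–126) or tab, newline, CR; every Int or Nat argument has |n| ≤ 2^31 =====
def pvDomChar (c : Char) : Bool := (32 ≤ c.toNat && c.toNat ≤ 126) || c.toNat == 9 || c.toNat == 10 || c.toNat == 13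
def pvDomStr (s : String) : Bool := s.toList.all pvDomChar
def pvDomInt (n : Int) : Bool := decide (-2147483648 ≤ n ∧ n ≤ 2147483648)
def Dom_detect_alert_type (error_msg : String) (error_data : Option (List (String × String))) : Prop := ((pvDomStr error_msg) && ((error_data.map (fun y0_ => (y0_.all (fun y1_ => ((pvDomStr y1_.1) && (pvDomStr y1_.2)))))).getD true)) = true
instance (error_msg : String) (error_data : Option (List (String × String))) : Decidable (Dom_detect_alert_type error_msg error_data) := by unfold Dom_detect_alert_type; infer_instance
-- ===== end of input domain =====

-- B replaces A's ordered short-circuit if-chain by a naive multi-pattern scan: one pass over message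
-- positions collects every matched keyword into a set, then a keyword→category stage and a priority
-- pass pick the winner (alternative algorithm, similar cost).


-- ===== PORT A =====
def detect_alert_type (error_msg : String) (error_data : Option (List (String × String))) : String :=
  -- error_data = error_data or {}
  let ed : PySem.Dict String String := PySem.Dict.ofList (error_data.getD [])
  let m := PySem.Str.lower error_msg
  if ed.contains "alert_type" then (ed.get? "alert_type").getD "" else
  if PySem.Str.isIn "zero rows saved" m || PySem.Str.isIn "saved 0" m then "no_data_saved" else
  if PySem.Str.isIn "no data saved" m || PySem.Str.isIn "empty result" m then "no_data_saved" else
  if PySem.Str.isIn "could not serialize" m || PySem.Str.isIn "concurrent update" m then "database_conflict" else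
  if ["crashed", "terminated", "service down", "unavailable"].any (fun k => PySem.Str.isIn k m) then "service_failure" else
  if ["slow", "timeout", "performance", "taking longer"].any (fun k => PySem.Str.isIn k m) then "slow_processing" else
  if ["stale", "outdated", "not been updated", "not updated"].any (fun k => PySem.Str.isIn k m) then "stale_data" else
  if PySem.Str.isIn "stall" m || PySem.Str.isIn "not progressing" m then "pipeline_stalled" else
  if ["data quality", "incomplete", "missing data", "unexpected"].any (fun k => PySem.Str.isIn k m) then "data_quality_issue" else
  if PySem.Str.isIn "validation" m || PySem.Str.isIn "anomaly" m then "data_anomaly" else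
  if PySem.Str.isIn "unresolved" m && PySem.Str.isIn "high" m then "high_unresolved_count" else
  "processing_failed"

-- ===== PORT B =====
-- _RULES: keyword → category (None for the two conjunction-only keywords)
def pvRules : List (String × Option String) :=
  [ ("zero rows saved", some "no_data_saved"), ("saved 0", some "no_data_saved"),
    ("no data saved", some "no_data_saved"), ("empty result", some "no_data_saved"),
    ("could not serialize", some "database_conflict"), ("concurrent update", some "database_conflict"),
    ("crashed", some "service_failure"), ("terminated", some "service_failure"),
    ("service down", some "service_failure"), ("unavailable", some "service_failure"),
    ("slow", some "slow_processing"), ("timeout", some "slow_processing"),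
    ("performance", some "slow_processing"), ("taking longer", some "slow_processing"),
    ("stale", some "stale_data"), ("outdated", some "stale_data"),
    ("not been updated", some "stale_data"), ("not updated", some "stale_data"),
    ("stall", some "pipeline_stalled"), ("not progressing", some "pipeline_stalled"),
    ("data quality", some "data_quality_issue"), ("incomplete", some "data_quality_issue"),
    ("missing data", some "data_quality_issue"), ("unexpected", some "data_quality_issue"),
    ("validation", some "data_anomaly"), ("anomaly", some "data_anomaly"),
    ("unresolved", none), ("high", none) ]

def pvPriority : List String :=
  [ "no_data_saved", "database_conflict", "service_failure", "slow_processing",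
    "stale_data", "pipeline_stalled", "data_quality_issue", "data_anomaly",
    "high_unresolved_count" ]

-- hits = {kw | some position i of m starts with kw}; m.startswith(kw, i) for 0 ≤ i is ported
-- exactly as kw.toList being a prefix of m.drop i
def pvHits (m : List Char) : PySem.Set String :=
  (List.range m.length).foldl
    (fun h i => pvRules.foldl
      (fun h r => if PySem.Chars.startswith (m.drop i) r.1.toList then PySem.Set.add h r.1 else h) h)
    PySem.Set.empty

-- cats = {cat for kw, cat in _RULES if kw in hits and cat is not None}
def pvCats (h : PySem.Set String) : PySem.Set String :=
  PySem.Set.ofList ((pvRules.filter (fun r => h.contains r.1 && r.2.isSome)).map (fun r => r.2.getD ""))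

-- for cat in _PRIORITY: if cat in cats: return cat / return 'processing_failed'
def pvFirst (cats : PySem.Set String) : List String → String
  | [] => "processing_failed"
  | c :: rest => if cats.contains c then c else pvFirst cats rest

def detect_alert_type_alt (error_msg : String) (error_data : Option (List (String × String))) : String :=
  let edl := error_data.getD []
  let ed : PySem.Dict String String := PySem.Dict.ofList edl
  if !edl.isEmpty && ed.contains "alert_type" then (ed.get? "alert_type").getD "" else
  let m := PySem.Chars.lower error_msg.toList
  let hits := pvHits m
  let cats := pvCats hits
  let cats := if hits.contains "unresolved" && hits.contains "high" then PySem.Set.add cats "high_unresolved_count" else cats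
  pvFirst cats pvPriority

-- ===== PRECONDITION & SPEC =====
def Spec_detect_alert_type (error_msg : String) (error_data : Option (List (String × String))) (out : String) : Prop := out = detect_alert_type_alt error_msg error_data
instance (error_msg : String) (error_data : Option (List (String × String))) (out : String) : Decidable (Spec_detect_alert_type error_msg error_data out) := by unfold Spec_detect_alert_type; infer_instance

-- ===== CLAIM (what is proved, stated in full; the proofs are below) =====
def Claim_equal_detect_alert_type : Prop := ∀ (error_msg : String) (error_data : Option (List (String × String))), Dom_detect_alert_type error_msg error_data → Spec_detect_alert_type error_msg error_data (detect_alert_type error_msg error_data)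

-- ===== LEMMAS AND PROOFS =====

lemma pv_contains_iff_mem (s : PySem.Set String) (x : String) : s.contains x = true ↔ x ∈ s := by
  simp [PySem.Set.contains]

lemma pv_contains_add (s : PySem.Set String) (x y : String) :
    (PySem.Set.add s x).contains y = (s.contains y || x == y) := by
  rw [Bool.eq_iff_iff]
  simp only [pv_contains_iff_mem, Bool.or_eq_true, beq_iff_eq, PySem.Set.mem_add]
  constructor
  · rintro (h | rfl)
    · exact Or.inl h
    · exact Or.inr rfl
  · rintro (h | rfl)
    · exact Or.inl h
    · exact Or.inr rfl

lemma pv_mem_inner (rs : List (String × Option String)) (h : PySem.Set String)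
    (q : (String × Option String) → Bool) (kw : String) :
    kw ∈ rs.foldl (fun h r => if q r then PySem.Set.add h r.1 else h) h ↔
      kw ∈ h ∨ ∃ r ∈ rs, q r = true ∧ r.1 = kw := by
  induction rs generalizing h with
  | nil => simp
  | cons a t ih =>
    simp only [List.foldl_cons]
    by_cases hq : q a = true
    · rw [if_pos hq, ih]
      simp [PySem.Set.mem_add, hq]
      tauto
    · rw [if_neg hq, ih]
      simp only [List.mem_cons]
      constructor
      · rintro (h1 | ⟨r, hr, hqr, hkw⟩)
        · exact Or.inl h1
        · exact Or.inr ⟨r, Or.inr hr, hqr, hkw⟩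
      · rintro (h1 | ⟨r, (rfl | hr), hqr, hkw⟩)
        · exact Or.inl h1
        · exact absurd hqr hq
        · exact Or.inr ⟨r, hr, hqr, hkw⟩

lemma pv_mem_outer (ns : List Nat) (h0 : PySem.Set String) (m : List Char) (kw : String) :
    kw ∈ ns.foldl (fun h i => pvRules.foldl
        (fun h r => if PySem.Chars.startswith (m.drop i) r.1.toList then PySem.Set.add h r.1 else h) h) h0 ↔
      kw ∈ h0 ∨ ∃ i ∈ ns, ∃ r ∈ pvRules, PySem.Chars.startswith (m.drop i) r.1.toList = true ∧ r.1 = kw := by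
  induction ns generalizing h0 with
  | nil => simp
  | cons a t ih =>
    simp only [List.foldl_cons]
    rw [ih, pv_mem_inner pvRules _ (fun r => PySem.Chars.startswith (m.drop a) r.1.toList) kw]
    simp only [List.mem_cons]
    constructor
    · rintro (h1 | ⟨i, hi, hrest⟩)
      · rcases h1 with h1 | ⟨r, hr, hsw, hkw⟩
        · exact Or.inl h1
        · exact Or.inr ⟨a, Or.inl rfl, r, hr, hsw, hkw⟩
      · exact Or.inr ⟨i, Or.inr hi, hrest⟩
    · rintro (h1 | ⟨i, (rfl | hi), hrest⟩)
      · exact Or.inl (Or.inl h1)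
      · exact Or.inl (Or.inr hrest)
      · exact Or.inr ⟨i, hi, hrest⟩

lemma pv_mem_hits (m : List Char) (kw : String) :
    kw ∈ pvHits m ↔
      ∃ i < m.length, ∃ r ∈ pvRules, PySem.Chars.startswith (m.drop i) r.1.toList = true ∧ r.1 = kw := by
  unfold pvHits
  rw [pv_mem_outer]
  simp [PySem.Set.empty, List.mem_range]

lemma pv_contains_hits (m : List Char) (kw : String)
    (hmem : pvRules.any (fun r => r.1 == kw) = true) (hne : kw.toList ≠ []) :
    (pvHits m).contains kw = PySem.Chars.isIn kw.toList m := by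
  rw [Bool.eq_iff_iff, pv_contains_iff_mem, pv_mem_hits, ← PySem.Chars.exists_prefix_drop_iff_isIn]
  constructor
  · rintro ⟨i, _, r, _, hsw, rfl⟩
    exact ⟨i, (PySem.Chars.startswith_iff _ _).1 hsw⟩
  · rintro ⟨j, hj⟩
    by_cases hlt : j < m.length
    · simp only [List.any_eq_true, beq_iff_eq] at hmem
      obtain ⟨r, hr, hrkw⟩ := hmem
      exact ⟨j, hlt, r, hr, (PySem.Chars.startswith_iff _ _).2 (hrkw ▸ hj), hrkw⟩
    · exfalso
      rw [List.drop_eq_nil_of_le (by omega)] at hj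
      exact hne (List.prefix_nil.mp hj)

lemma pv_contains_cats (h : PySem.Set String) (c : String) :
    (pvCats h).contains c = pvRules.any (fun r => h.contains r.1 && r.2 == some c) := by
  rw [Bool.eq_iff_iff]
  unfold pvCats
  rw [pv_contains_iff_mem, PySem.Set.mem_ofList]
  simp only [List.mem_map, List.mem_filter, List.any_eq_true, Bool.and_eq_true, beq_iff_eq]
  constructor
  · rintro ⟨r, ⟨hr, hcond, hsome⟩, hgetD⟩
    cases h2 : r.2 with
    | none => rw [h2] at hsome; exact absurd hsome (by simp)
    | some v =>
      refine ⟨r, hr, hcond, ?_⟩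
      rw [h2] at hgetD ⊢
      simp at hgetD
      rw [hgetD]
  · rintro ⟨r, hr, hcond, hsome⟩
    exact ⟨r, ⟨hr, hcond, by rw [hsome]; rfl⟩, by rw [hsome]; rfl⟩

-- ===== VERDICT (by name: the statement is the Claim_ definition above) =====
set_option maxHeartbeats 16000000 in
theorem detect_alert_type_spec : Claim_equal_detect_alert_type := by
  intro error_msg error_data _
  unfold Spec_detect_alert_type
  simp only [detect_alert_type, detect_alert_type_alt]
  cases hc : (PySem.Dict.ofList (error_data.getD [])).contains "alert_type" with
  | true =>
      have hne : (error_data.getD []).isEmpty = false := by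
        cases h : error_data.getD [] with
        | nil => rw [h] at hc; exact absurd hc (by decide)
        | cons a t => rfl
      simp [hne]
  | false =>
      simp only [Bool.and_false, Bool.false_eq_true, if_false]
      have hbridge : ∀ kw : String, PySem.Str.isIn kw (PySem.Str.lower error_msg) =
          PySem.Chars.isIn kw.toList (PySem.Chars.lower error_msg.toList) := by
        intro kw; simp only [PySem.Str.isIn_eq, PySem.Str.toList_lower]
      simp only [hbridge, List.any_cons, List.any_nil]
      set M := PySem.Chars.lower error_msg.toList with hM
      have k01 : (pvHits M).contains "zero rows saved" = PySem.Chars.isIn "zero rows saved".toList M :=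
        pv_contains_hits M _ (by decide) (by decide)
      have k02 : (pvHits M).contains "saved 0" = PySem.Chars.isIn "saved 0".toList M :=
        pv_contains_hits M _ (by decide) (by decide)
      have k03 : (pvHits M).contains "no data saved" = PySem.Chars.isIn "no data saved".toList M :=
        pv_contains_hits M _ (by decide) (by decide)
      have k04 : (pvHits M).contains "empty result" = PySem.Chars.isIn "empty result".toList M :=
        pv_contains_hits M _ (by decide) (by decide)
      have k05 : (pvHits M).contains "could not serialize" = PySem.Chars.isIn "could not serialize".toList M :=
        pv_contains_hits M _ (by decide) (by decide)
      have k06 : (pvHits M).contains "concurrent update" = PySem.Chars.isIn "concurrent update".toList M :=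
        pv_contains_hits M _ (by decide) (by decide)
      have k07 : (pvHits M).contains "crashed" = PySem.Chars.isIn "crashed".toList M :=
        pv_contains_hits M _ (by decide) (by decide)
      have k08 : (pvHits M).contains "terminated" = PySem.Chars.isIn "terminated".toList M :=
        pv_contains_hits M _ (by decide) (by decide)
      have k09 : (pvHits M).contains "service down" = PySem.Chars.isIn "service down".toList M :=
        pv_contains_hits M _ (by decide) (by decide)
      have k10 : (pvHits M).contains "unavailable" = PySem.Chars.isIn "unavailable".toList M :=
        pv_contains_hits M _ (by decide) (by decide)
      have k11 : (pvHits M).contains "slow" = PySem.Chars.isIn "slow".toList M :=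
        pv_contains_hits M _ (by decide) (by decide)
      have k12 : (pvHits M).contains "timeout" = PySem.Chars.isIn "timeout".toList M :=
        pv_contains_hits M _ (by decide) (by decide)
      have k13 : (pvHits M).contains "performance" = PySem.Chars.isIn "performance".toList M :=
        pv_contains_hits M _ (by decide) (by decide)
      have k14 : (pvHits M).contains "taking longer" = PySem.Chars.isIn "taking longer".toList M :=
        pv_contains_hits M _ (by decide) (by decide)
      have k15 : (pvHits M).contains "stale" = PySem.Chars.isIn "stale".toList M :=
        pv_contains_hits M _ (by decide) (by decide)
      have k16 : (pvHits M).contains "outdated" = PySem.Chars.isIn "outdated".toList M :=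
        pv_contains_hits M _ (by decide) (by decide)
      have k17 : (pvHits M).contains "not been updated" = PySem.Chars.isIn "not been updated".toList M :=
        pv_contains_hits M _ (by decide) (by decide)
      have k18 : (pvHits M).contains "not updated" = PySem.Chars.isIn "not updated".toList M :=
        pv_contains_hits M _ (by decide) (by decide)
      have k19 : (pvHits M).contains "stall" = PySem.Chars.isIn "stall".toList M :=
        pv_contains_hits M _ (by decide) (by decide)
      have k20 : (pvHits M).contains "not progressing" = PySem.Chars.isIn "not progressing".toList M :=
        pv_contains_hits M _ (by decide) (by decide)
      have k21 : (pvHits M).contains "data quality" = PySem.Chars.isIn "data quality".toList M :=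
        pv_contains_hits M _ (by decide) (by decide)
      have k22 : (pvHits M).contains "incomplete" = PySem.Chars.isIn "incomplete".toList M :=
        pv_contains_hits M _ (by decide) (by decide)
      have k23 : (pvHits M).contains "missing data" = PySem.Chars.isIn "missing data".toList M :=
        pv_contains_hits M _ (by decide) (by decide)
      have k24 : (pvHits M).contains "unexpected" = PySem.Chars.isIn "unexpected".toList M :=
        pv_contains_hits M _ (by decide) (by decide)
      have k25 : (pvHits M).contains "validation" = PySem.Chars.isIn "validation".toList M :=
        pv_contains_hits M _ (by decide) (by decide)
      have k26 : (pvHits M).contains "anomaly" = PySem.Chars.isIn "anomaly".toList M :=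
        pv_contains_hits M _ (by decide) (by decide)
      have k27 : (pvHits M).contains "unresolved" = PySem.Chars.isIn "unresolved".toList M :=
        pv_contains_hits M _ (by decide) (by decide)
      have k28 : (pvHits M).contains "high" = PySem.Chars.isIn "high".toList M :=
        pv_contains_hits M _ (by decide) (by decide)
      have hcats := pv_contains_cats (pvHits M)
      have c1 : (pvCats (pvHits M)).contains "no_data_saved" =
          (PySem.Chars.isIn "zero rows saved".toList M || PySem.Chars.isIn "saved 0".toList M ||
           PySem.Chars.isIn "no data saved".toList M || PySem.Chars.isIn "empty result".toList M) := by
        rw [hcats]; simp only [pvRules, List.any_cons, List.any_nil, k01, k02, k03, k04, k05, k06, k07, k08, k09, k10, k11, k12, k13, k14, k15, k16, k17, k18, k19, k20, k21, k22, k23, k24, k25, k26, k27, k28]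
        simp only [show ((some "no_data_saved" : Option String) == some "no_data_saved") = true from by decide,
          show ((some "database_conflict" : Option String) == some "no_data_saved") = false from by decide,
          show ((some "service_failure" : Option String) == some "no_data_saved") = false from by decide,
          show ((some "slow_processing" : Option String) == some "no_data_saved") = false from by decide,
          show ((some "stale_data" : Option String) == some "no_data_saved") = false from by decide,
          show ((some "pipeline_stalled" : Option String) == some "no_data_saved") = false from by decide,
          show ((some "data_quality_issue" : Option String) == some "no_data_saved") = false from by decide,
          show ((some "data_anomaly" : Option String) == some "no_data_saved") = false from by decide,
          show ((none : Option String) == some "no_data_saved") = false from by decide,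
          Bool.and_true, Bool.and_false, Bool.or_false, Bool.false_or, Bool.or_assoc]
      have c2 : (pvCats (pvHits M)).contains "database_conflict" =
          (PySem.Chars.isIn "could not serialize".toList M || PySem.Chars.isIn "concurrent update".toList M) := by
        rw [hcats]; simp only [pvRules, List.any_cons, List.any_nil, k01, k02, k03, k04, k05, k06, k07, k08, k09, k10, k11, k12, k13, k14, k15, k16, k17, k18, k19, k20, k21, k22, k23, k24, k25, k26, k27, k28]
        simp only [show ((some "no_data_saved" : Option String) == some "database_conflict") = false from by decide,
          show ((some "database_conflict" : Option String) == some "database_conflict") = true from by decide,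
          show ((some "service_failure" : Option String) == some "database_conflict") = false from by decide,
          show ((some "slow_processing" : Option String) == some "database_conflict") = false from by decide,
          show ((some "stale_data" : Option String) == some "database_conflict") = false from by decide,
          show ((some "pipeline_stalled" : Option String) == some "database_conflict") = false from by decide,
          show ((some "data_quality_issue" : Option String) == some "database_conflict") = false from by decide,
          show ((some "data_anomaly" : Option String) == some "database_conflict") = false from by decide,
          show ((none : Option String) == some "database_conflict") = false from by decide,
          Bool.and_true, Bool.and_false, Bool.or_false, Bool.false_or, Bool.or_assoc]
      have c3 : (pvCats (pvHits M)).contains "service_failure" =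
          (PySem.Chars.isIn "crashed".toList M || PySem.Chars.isIn "terminated".toList M ||
           PySem.Chars.isIn "service down".toList M || PySem.Chars.isIn "unavailable".toList M) := by
        rw [hcats]; simp only [pvRules, List.any_cons, List.any_nil, k01, k02, k03, k04, k05, k06, k07, k08, k09, k10, k11, k12, k13, k14, k15, k16, k17, k18, k19, k20, k21, k22, k23, k24, k25, k26, k27, k28]
        simp only [show ((some "no_data_saved" : Option String) == some "service_failure") = false from by decide,
          show ((some "database_conflict" : Option String) == some "service_failure") = false from by decide,
          show ((some "service_failure" : Option String) == some "service_failure") = true from by decide,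
          show ((some "slow_processing" : Option String) == some "service_failure") = false from by decide,
          show ((some "stale_data" : Option String) == some "service_failure") = false from by decide,
          show ((some "pipeline_stalled" : Option String) == some "service_failure") = false from by decide,
          show ((some "data_quality_issue" : Option String) == some "service_failure") = false from by decide,
          show ((some "data_anomaly" : Option String) == some "service_failure") = false from by decide,
          show ((none : Option String) == some "service_failure") = false from by decide,
          Bool.and_true, Bool.and_false, Bool.or_false, Bool.false_or, Bool.or_assoc]
      have c4 : (pvCats (pvHits M)).contains "slow_processing" =
          (PySem.Chars.isIn "slow".toList M || PySem.Chars.isIn "timeout".toList M ||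
           PySem.Chars.isIn "performance".toList M || PySem.Chars.isIn "taking longer".toList M) := by
        rw [hcats]; simp only [pvRules, List.any_cons, List.any_nil, k01, k02, k03, k04, k05, k06, k07, k08, k09, k10, k11, k12, k13, k14, k15, k16, k17, k18, k19, k20, k21, k22, k23, k24, k25, k26, k27, k28]
        simp only [show ((some "no_data_saved" : Option String) == some "slow_processing") = false from by decide,
          show ((some "database_conflict" : Option String) == some "slow_processing") = false from by decide,
          show ((some "service_failure" : Option String) == some "slow_processing") = false from by decide,
          show ((some "slow_processing" : Option String) == some "slow_processing") = true from by decide,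
          show ((some "stale_data" : Option String) == some "slow_processing") = false from by decide,
          show ((some "pipeline_stalled" : Option String) == some "slow_processing") = false from by decide,
          show ((some "data_quality_issue" : Option String) == some "slow_processing") = false from by decide,
          show ((some "data_anomaly" : Option String) == some "slow_processing") = false from by decide,
          show ((none : Option String) == some "slow_processing") = false from by decide,
          Bool.and_true, Bool.and_false, Bool.or_false, Bool.false_or, Bool.or_assoc]
      have c5 : (pvCats (pvHits M)).contains "stale_data" =
          (PySem.Chars.isIn "stale".toList M || PySem.Chars.isIn "outdated".toList M ||
           PySem.Chars.isIn "not been updated".toList M || PySem.Chars.isIn "not updated".toList M) := by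
        rw [hcats]; simp only [pvRules, List.any_cons, List.any_nil, k01, k02, k03, k04, k05, k06, k07, k08, k09, k10, k11, k12, k13, k14, k15, k16, k17, k18, k19, k20, k21, k22, k23, k24, k25, k26, k27, k28]
        simp only [show ((some "no_data_saved" : Option String) == some "stale_data") = false from by decide,
          show ((some "database_conflict" : Option String) == some "stale_data") = false from by decide,
          show ((some "service_failure" : Option String) == some "stale_data") = false from by decide,
          show ((some "slow_processing" : Option String) == some "stale_data") = false from by decide,
          show ((some "stale_data" : Option String) == some "stale_data") = true from by decide,
          show ((some "pipeline_stalled" : Option String) == some "stale_data") = false from by decide,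
          show ((some "data_quality_issue" : Option String) == some "stale_data") = false from by decide,
          show ((some "data_anomaly" : Option String) == some "stale_data") = false from by decide,
          show ((none : Option String) == some "stale_data") = false from by decide,
          Bool.and_true, Bool.and_false, Bool.or_false, Bool.false_or, Bool.or_assoc]
      have c6 : (pvCats (pvHits M)).contains "pipeline_stalled" =
          (PySem.Chars.isIn "stall".toList M || PySem.Chars.isIn "not progressing".toList M) := by
        rw [hcats]; simp only [pvRules, List.any_cons, List.any_nil, k01, k02, k03, k04, k05, k06, k07, k08, k09, k10, k11, k12, k13, k14, k15, k16, k17, k18, k19, k20, k21, k22, k23, k24, k25, k26, k27, k28]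
        simp only [show ((some "no_data_saved" : Option String) == some "pipeline_stalled") = false from by decide,
          show ((some "database_conflict" : Option String) == some "pipeline_stalled") = false from by decide,
          show ((some "service_failure" : Option String) == some "pipeline_stalled") = false from by decide,
          show ((some "slow_processing" : Option String) == some "pipeline_stalled") = false from by decide,
          show ((some "stale_data" : Option String) == some "pipeline_stalled") = false from by decide,
          show ((some "pipeline_stalled" : Option String) == some "pipeline_stalled") = true from by decide,
          show ((some "data_quality_issue" : Option String) == some "pipeline_stalled") = false from by decide,
          show ((some "data_anomaly" : Option String) == some "pipeline_stalled") = false from by decide,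
          show ((none : Option String) == some "pipeline_stalled") = false from by decide,
          Bool.and_true, Bool.and_false, Bool.or_false, Bool.false_or, Bool.or_assoc]
      have c7 : (pvCats (pvHits M)).contains "data_quality_issue" =
          (PySem.Chars.isIn "data quality".toList M || PySem.Chars.isIn "incomplete".toList M ||
           PySem.Chars.isIn "missing data".toList M || PySem.Chars.isIn "unexpected".toList M) := by
        rw [hcats]; simp only [pvRules, List.any_cons, List.any_nil, k01, k02, k03, k04, k05, k06, k07, k08, k09, k10, k11, k12, k13, k14, k15, k16, k17, k18, k19, k20, k21, k22, k23, k24, k25, k26, k27, k28]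
        simp only [show ((some "no_data_saved" : Option String) == some "data_quality_issue") = false from by decide,
          show ((some "database_conflict" : Option String) == some "data_quality_issue") = false from by decide,
          show ((some "service_failure" : Option String) == some "data_quality_issue") = false from by decide,
          show ((some "slow_processing" : Option String) == some "data_quality_issue") = false from by decide,
          show ((some "stale_data" : Option String) == some "data_quality_issue") = false from by decide,
          show ((some "pipeline_stalled" : Option String) == some "data_quality_issue") = false from by decide,
          show ((some "data_quality_issue" : Option String) == some "data_quality_issue") = true from by decide,
          show ((some "data_anomaly" : Option String) == some "data_quality_issue") = false from by decide,
          show ((none : Option String) == some "data_quality_issue") = false from by decide,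
          Bool.and_true, Bool.and_false, Bool.or_false, Bool.false_or, Bool.or_assoc]
      have c8 : (pvCats (pvHits M)).contains "data_anomaly" =
          (PySem.Chars.isIn "validation".toList M || PySem.Chars.isIn "anomaly".toList M) := by
        rw [hcats]; simp only [pvRules, List.any_cons, List.any_nil, k01, k02, k03, k04, k05, k06, k07, k08, k09, k10, k11, k12, k13, k14, k15, k16, k17, k18, k19, k20, k21, k22, k23, k24, k25, k26, k27, k28]
        simp only [show ((some "no_data_saved" : Option String) == some "data_anomaly") = false from by decide,
          show ((some "database_conflict" : Option String) == some "data_anomaly") = false from by decide,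
          show ((some "service_failure" : Option String) == some "data_anomaly") = false from by decide,
          show ((some "slow_processing" : Option String) == some "data_anomaly") = false from by decide,
          show ((some "stale_data" : Option String) == some "data_anomaly") = false from by decide,
          show ((some "pipeline_stalled" : Option String) == some "data_anomaly") = false from by decide,
          show ((some "data_quality_issue" : Option String) == some "data_anomaly") = false from by decide,
          show ((some "data_anomaly" : Option String) == some "data_anomaly") = true from by decide,
          show ((none : Option String) == some "data_anomaly") = false from by decide,
          Bool.and_true, Bool.and_false, Bool.or_false, Bool.false_or, Bool.or_assoc]
      have c9 : (pvCats (pvHits M)).contains "high_unresolved_count" = false := by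
        rw [hcats]; simp only [pvRules, List.any_cons, List.any_nil, k01, k02, k03, k04, k05, k06, k07, k08, k09, k10, k11, k12, k13, k14, k15, k16, k17, k18, k19, k20, k21, k22, k23, k24, k25, k26, k27, k28]
        simp only [show ((some "no_data_saved" : Option String) == some "high_unresolved_count") = false from by decide,
          show ((some "database_conflict" : Option String) == some "high_unresolved_count") = false from by decide,
          show ((some "service_failure" : Option String) == some "high_unresolved_count") = false from by decide,
          show ((some "slow_processing" : Option String) == some "high_unresolved_count") = false from by decide,
          show ((some "stale_data" : Option String) == some "high_unresolved_count") = false from by decide,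
          show ((some "pipeline_stalled" : Option String) == some "high_unresolved_count") = false from by decide,
          show ((some "data_quality_issue" : Option String) == some "high_unresolved_count") = false from by decide,
          show ((some "data_anomaly" : Option String) == some "high_unresolved_count") = false from by decide,
          show ((none : Option String) == some "high_unresolved_count") = false from by decide,
          Bool.and_true, Bool.and_false, Bool.or_false, Bool.false_or, Bool.or_assoc]
      by_cases hcon : ((pvHits M).contains "unresolved" && (pvHits M).contains "high") = true
      · rw [if_pos hcon]
        rw [k27, k28] at hcon
        simp only [pvFirst, pvPriority, pv_contains_add, c1, c2, c3, c4, c5, c6, c7, c8, c9]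
        simp only [show (("high_unresolved_count" : String) == "no_data_saved") = false from by decide,
          show (("high_unresolved_count" : String) == "database_conflict") = false from by decide,
          show (("high_unresolved_count" : String) == "service_failure") = false from by decide,
          show (("high_unresolved_count" : String) == "slow_processing") = false from by decide,
          show (("high_unresolved_count" : String) == "stale_data") = false from by decide,
          show (("high_unresolved_count" : String) == "pipeline_stalled") = false from by decide,
          show (("high_unresolved_count" : String) == "data_quality_issue") = false from by decide,
          show (("high_unresolved_count" : String) == "data_anomaly") = false from by decide,
          show (("high_unresolved_count" : String) == "high_unresolved_count") = true from by decide,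
          Bool.or_false, Bool.false_or, Bool.or_true]
        clear c1 c2 c3 c4 c5 c6 c7 c8 c9 k01 k02 k03 k04 k05 k06 k07 k08 k09 k10 k11 k12 k13 k14 k15 k16 k17 k18 k19 k20 k21 k22 k23 k24 k25 k26 k27 k28 hcats hbridge hc
        revert hcon
        generalize PySem.Chars.isIn "zero rows saved".toList M = b01
        generalize PySem.Chars.isIn "saved 0".toList M = b02
        generalize PySem.Chars.isIn "no data saved".toList M = b03
        generalize PySem.Chars.isIn "empty result".toList M = b04
        generalize PySem.Chars.isIn "could not serialize".toList M = b05
        generalize PySem.Chars.isIn "concurrent update".toList M = b06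
        generalize PySem.Chars.isIn "crashed".toList M = b07
        generalize PySem.Chars.isIn "terminated".toList M = b08
        generalize PySem.Chars.isIn "service down".toList M = b09
        generalize PySem.Chars.isIn "unavailable".toList M = b10
        generalize PySem.Chars.isIn "slow".toList M = b11
        generalize PySem.Chars.isIn "timeout".toList M = b12
        generalize PySem.Chars.isIn "performance".toList M = b13
        generalize PySem.Chars.isIn "taking longer".toList M = b14
        generalize PySem.Chars.isIn "stale".toList M = b15
        generalize PySem.Chars.isIn "outdated".toList M = b16
        generalize PySem.Chars.isIn "not been updated".toList M = b17
        generalize PySem.Chars.isIn "not updated".toList M = b18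
        generalize PySem.Chars.isIn "stall".toList M = b19
        generalize PySem.Chars.isIn "not progressing".toList M = b20
        generalize PySem.Chars.isIn "data quality".toList M = b21
        generalize PySem.Chars.isIn "incomplete".toList M = b22
        generalize PySem.Chars.isIn "missing data".toList M = b23
        generalize PySem.Chars.isIn "unexpected".toList M = b24
        generalize PySem.Chars.isIn "validation".toList M = b25
        generalize PySem.Chars.isIn "anomaly".toList M = b26
        generalize PySem.Chars.isIn "unresolved".toList M = b27
        generalize PySem.Chars.isIn "high".toList M = b28
        intro hcon
        clear hM M
        split_ifs <;> simp_all only [Bool.or_eq_true, Bool.and_eq_true, not_or, Bool.false_eq_true, or_false, false_or, not_true, false_and, and_false, true_and, and_true, not_false_iff, or_true, true_or]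
      · rw [if_neg hcon]
        rw [k27, k28] at hcon
        simp only [pvFirst, pvPriority, c1, c2, c3, c4, c5, c6, c7, c8, c9,
          Bool.false_eq_true, if_false]
        clear c1 c2 c3 c4 c5 c6 c7 c8 c9 k01 k02 k03 k04 k05 k06 k07 k08 k09 k10 k11 k12 k13 k14 k15 k16 k17 k18 k19 k20 k21 k22 k23 k24 k25 k26 k27 k28 hcats hbridge hc
        revert hcon
        generalize PySem.Chars.isIn "zero rows saved".toList M = b01
        generalize PySem.Chars.isIn "saved 0".toList M = b02
        generalize PySem.Chars.isIn "no data saved".toList M = b03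
        generalize PySem.Chars.isIn "empty result".toList M = b04
        generalize PySem.Chars.isIn "could not serialize".toList M = b05
        generalize PySem.Chars.isIn "concurrent update".toList M = b06
        generalize PySem.Chars.isIn "crashed".toList M = b07
        generalize PySem.Chars.isIn "terminated".toList M = b08
        generalize PySem.Chars.isIn "service down".toList M = b09
        generalize PySem.Chars.isIn "unavailable".toList M = b10
        generalize PySem.Chars.isIn "slow".toList M = b11
        generalize PySem.Chars.isIn "timeout".toList M = b12
        generalize PySem.Chars.isIn "performance".toList M = b13
        generalize PySem.Chars.isIn "taking longer".toList M = b14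
        generalize PySem.Chars.isIn "stale".toList M = b15
        generalize PySem.Chars.isIn "outdated".toList M = b16
        generalize PySem.Chars.isIn "not been updated".toList M = b17
        generalize PySem.Chars.isIn "not updated".toList M = b18
        generalize PySem.Chars.isIn "stall".toList M = b19
        generalize PySem.Chars.isIn "not progressing".toList M = b20
        generalize PySem.Chars.isIn "data quality".toList M = b21
        generalize PySem.Chars.isIn "incomplete".toList M = b22
        generalize PySem.Chars.isIn "missing data".toList M = b23
        generalize PySem.Chars.isIn "unexpected".toList M = b24
        generalize PySem.Chars.isIn "validation".toList M = b25
        generalize PySem.Chars.isIn "anomaly".toList M = b26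
        generalize PySem.Chars.isIn "unresolved".toList M = b27
        generalize PySem.Chars.isIn "high".toList M = b28
        intro hcon
        clear hM M
        split_ifs <;> simp_all only [Bool.or_eq_true, Bool.and_eq_true, not_or, Bool.false_eq_true, or_false, false_or, not_true, false_and, and_false, true_and, and_true, not_false_iff, or_true, true_or]
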